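-- pv_equiv track=rewrite | github.com/jinyuo/Algorithm | 프로그래머스/2/12973. 짝지어 제거하기/짝지어 제거하기.py | solution
-- ===== SOURCE A (Python) =====
-- def solution(s):
--     stack = []
--
--     for t in s:
--         if stack:
--             if stack[-1] == t:
--                 stack.pop()
--             else:
--                 stack.append(t)
--         else:
--             stack.append(t)
--
--     return 0 if stack else 1
-- ===== SOURCE B (Python) =====
-- def solution(s):
--     cur = list(s)
--     while True:
--         nxt = []
--         i = 0
--         n = len(cur)
--         while i < n:
--             if i + 1 < n and cur[i] == cur[i + 1]:
--                 i += 2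
--             else:
--                 nxt.append(cur[i])
--                 i += 1
--         if len(nxt) == len(cur):
--             break
--         cur = nxt
--     return 1 if not cur else 0
-- ===== Notes on version B (the rewrite author's own statement) =====
-- stated objective: alternative
-- what changed: Replaced the single-pass stack with a fixed-point reduction: repeatedly rescan the string dropping each adjacent equal pair until a full pass removes nothing, then test emptiness.
import Mathlib
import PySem

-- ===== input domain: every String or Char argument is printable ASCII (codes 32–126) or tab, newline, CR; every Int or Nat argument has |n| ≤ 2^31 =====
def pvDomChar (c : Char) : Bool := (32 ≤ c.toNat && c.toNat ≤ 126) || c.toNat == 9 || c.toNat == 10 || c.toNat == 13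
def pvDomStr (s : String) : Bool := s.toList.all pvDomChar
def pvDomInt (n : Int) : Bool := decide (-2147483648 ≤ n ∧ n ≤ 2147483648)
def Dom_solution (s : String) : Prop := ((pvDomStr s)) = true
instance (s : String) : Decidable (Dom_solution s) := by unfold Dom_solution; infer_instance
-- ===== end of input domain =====

-- B replaces the one-pass stack with a fixed-point repeated-rescan reduction (alternative algorithm, not faster).

-- ===== PORT A =====
-- Python stack (append/pop at the list end) ported with the stack top at the list head.
def solStep (stack : List Char) (t : Char) : List Char :=
  match stack with
  | [] => [t]
  | h :: tl => if h == t then tl else t :: h :: tl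

def solution (s : String) : Int :=
  let stack := s.toList.foldl solStep []
  if stack = [] then 1 else 0

-- ===== PORT B =====
-- one left-to-right pass of Source B's inner while loop: drop each adjacent equal pair found
def onePass : List Char → List Char
  | [] => []
  | [c] => [c]
  | a :: b :: rest => if a == b then onePass rest else a :: onePass (b :: rest)

-- needed by fixRed's decreasing_by
theorem onePass_length_le : ∀ l : List Char, (onePass l).length ≤ l.length := by
  intro l
  fun_induction onePass l with
  | case1 => simp
  | case2 c => simp
  | case3 a b rest h ih => simp only [List.length_cons] at *; omega
  | case4 a b rest h ih => simp only [List.length_cons] at *; omega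

-- Source B's outer while loop: rescan until a pass removes nothing
def fixRed (l : List Char) : List Char :=
  if (onePass l).length = l.length then l else fixRed (onePass l)
termination_by l.length
decreasing_by have := onePass_length_le l; omega

def solution_alt (s : String) : Int :=
  if fixRed s.toList = [] then 1 else 0

-- ===== PRECONDITION & SPEC =====
def Spec_solution (s : String) (out : Int) : Prop := out = solution_alt s
instance (s : String) (out : Int) : Decidable (Spec_solution s out) := by unfold Spec_solution; infer_instance

-- ===== CLAIM (what is proved, stated in full; the proofs are below) =====
def Claim_equal_solution : Prop := ∀ (s : String), Dom_solution s → Spec_solution s (solution s)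

-- ===== LEMMAS AND PROOFS =====

-- if a full pass removed nothing, the list has no adjacent equal pair
theorem chain_of_onePass_length (l : List Char)
    (h : (onePass l).length = l.length) : l.IsChain (· ≠ ·) := by
  fun_induction onePass l with
  | case1 => exact .nil
  | case2 c => exact .singleton c
  | case3 a b rest hab ih =>
      exfalso
      have := onePass_length_le rest
      simp only [List.length_cons] at *
      omega
  | case4 a b rest hab ih =>
      simp only [List.length_cons] at h
      exact List.isChain_cons_cons.mpr
        ⟨by simpa using hab, ih (by simp only [List.length_cons]; omega)⟩

-- solStep preserves irreducibility of the stack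
theorem solStep_chain {st : List Char} (h : st.IsChain (· ≠ ·)) (t : Char) :
    (solStep st t).IsChain (· ≠ ·) := by
  cases st with
  | nil => exact .singleton t
  | cons hd tl =>
      by_cases e : hd = t
      · simp only [solStep, beq_iff_eq, e, if_true]
        simpa using h.tail
      · simp only [solStep, beq_iff_eq, e, if_false]
        exact List.isChain_cons_cons.mpr ⟨fun h' => e h'.symm, h⟩

-- folding the stack over a pass gives the same stack as over the original list
theorem foldl_onePass (l : List Char) : ∀ st : List Char, st.IsChain (· ≠ ·) →
    List.foldl solStep st (onePass l) = List.foldl solStep st l := by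
  fun_induction onePass l with
  | case1 => intro st _; simp
  | case2 c => intro st _; simp
  | case3 a b rest hab ih =>
      intro st hst
      have hb : a = b := by simpa using hab
      subst hb
      have key : solStep (solStep st a) a = st := by
        cases st with
        | nil => simp [solStep]
        | cons hd tl =>
            by_cases e : hd = a
            · subst e
              simp only [solStep, beq_self_eq_true, if_true]
              cases tl with
              | nil => simp
              | cons h2 t2 =>
                  have hne2 : h2 ≠ hd := Ne.symm (List.isChain_cons_cons.mp hst).1
                  simp [beq_iff_eq, hne2]
            · simp [solStep, beq_iff_eq, e]
      calc List.foldl solStep st (onePass rest) = List.foldl solStep st rest := ih st hst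
        _ = List.foldl solStep (solStep (solStep st a) a) rest := by rw [key]
        _ = List.foldl solStep st (a :: a :: rest) := by simp [List.foldl]
  | case4 a b rest hab ih =>
      intro st hst
      simp only [List.foldl]
      exact ih (solStep st a) (solStep_chain hst a)

-- folding an irreducible list onto a compatible stack just reverses it on top
theorem foldl_of_chain : ∀ (l st : List Char), (st.reverse ++ l).IsChain (· ≠ ·) →
    List.foldl solStep st l = l.reverse ++ st := by
  intro l
  induction l with
  | nil => intro st _; simp
  | cons a rest ih =>
      intro st h
      have hstep : solStep st a = a :: st := by
        cases st with
        | nil => rfl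
        | cons hd tl =>
            have hne : hd ≠ a := by
              have h' : ((hd :: tl).reverse ++ a :: rest).IsChain (· ≠ ·) := h
              rw [List.reverse_cons, List.append_assoc, List.singleton_append] at h'
              exact (List.isChain_append_cons_cons.mp h').2.1
            simp [solStep, beq_iff_eq, hne]
      rw [List.foldl, hstep, ih (a :: st) (by simpa using h)]
      simp

theorem fixRed_foldl (l : List Char) :
    List.foldl solStep [] (fixRed l) = List.foldl solStep [] l := by
  fun_induction fixRed l with
  | case1 l hlen => rfl
  | case2 l hlen ih => rw [ih, foldl_onePass l [] .nil]

theorem fixRed_chain (l : List Char) : (fixRed l).IsChain (· ≠ ·) := by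
  fun_induction fixRed l with
  | case1 l hlen => exact chain_of_onePass_length l hlen
  | case2 l hlen ih => exact ih

theorem fixRed_eq_reverse (l : List Char) :
    fixRed l = (List.foldl solStep [] l).reverse := by
  have h1 := fixRed_foldl l
  have h2 := foldl_of_chain (fixRed l) [] (by simpa using fixRed_chain l)
  rw [h2] at h1
  simp at h1
  rw [← h1, List.reverse_reverse]

-- ===== VERDICT (by name: the statement is the Claim_ definition above) =====
theorem solution_spec : Claim_equal_solution := by
  intro s _
  unfold Spec_solution solution solution_alt
  rw [fixRed_eq_reverse]
  simp
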